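-- pv_equiv track=rewrite | github.com/VikingInOrbit/YuMi-Lab | pdf_to_md.py | inject_question_figure
-- ===== SOURCE A (Python) =====
-- def inject_question_figure(
--     page_text: str,
--     question_prefix: str,
--     image_link: str,
--     ocr_text: str,
-- ) -> str:
--     lines = page_text.split("\n")
--     output: list[str] = []
--     inserted = False
--
--     for line in lines:
--         output.append(line)
--         if (not inserted) and line.strip().startswith(question_prefix):
--             output.append(image_link)
--             if ocr_text.strip():
--                 output.append("OCR:")
--                 output.append("> " + "\n> ".join(ocr_text.splitlines()))
--             inserted = True
--
--     return "\n".join(output)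
-- ===== SOURCE B (Python) =====
-- def inject_question_figure(
--     page_text: str,
--     question_prefix: str,
--     image_link: str,
--     ocr_text: str,
-- ) -> str:
--     # Character-level scan: never split page_text into a list of lines.
--     # Walk the raw string newline by newline, keeping the consumed prefix in
--     # `head`; on the first line whose stripped form starts with question_prefix,
--     # splice the injection text directly between that line and the rest.
--     injection = "\n" + image_link
--     if ocr_text.strip():
--         injection += "\nOCR:\n> " + "\n> ".join(ocr_text.splitlines())
--     head = ""
--     rest = page_text
--     while True:
--         nl = rest.find("\n")
--         line = rest if nl == -1 else rest[:nl]
--         if line.strip().startswith(question_prefix):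
--             tail = "" if nl == -1 else rest[nl:]
--             return head + line + injection + tail
--         if nl == -1:
--             return page_text
--         head = head + rest[:nl + 1]
--         rest = rest[nl + 1:]
-- ===== Notes on version B (the rewrite author's own statement) =====
-- stated objective: alternative
-- what changed: B never builds a list of lines: it walks the raw string newline by newline with rest.find("\n") and string slicing, splicing the injection text directly into the page at the first matching line, instead of A's split-into-lines / flagged append-every-line / re-join pass.
import Mathlib
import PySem

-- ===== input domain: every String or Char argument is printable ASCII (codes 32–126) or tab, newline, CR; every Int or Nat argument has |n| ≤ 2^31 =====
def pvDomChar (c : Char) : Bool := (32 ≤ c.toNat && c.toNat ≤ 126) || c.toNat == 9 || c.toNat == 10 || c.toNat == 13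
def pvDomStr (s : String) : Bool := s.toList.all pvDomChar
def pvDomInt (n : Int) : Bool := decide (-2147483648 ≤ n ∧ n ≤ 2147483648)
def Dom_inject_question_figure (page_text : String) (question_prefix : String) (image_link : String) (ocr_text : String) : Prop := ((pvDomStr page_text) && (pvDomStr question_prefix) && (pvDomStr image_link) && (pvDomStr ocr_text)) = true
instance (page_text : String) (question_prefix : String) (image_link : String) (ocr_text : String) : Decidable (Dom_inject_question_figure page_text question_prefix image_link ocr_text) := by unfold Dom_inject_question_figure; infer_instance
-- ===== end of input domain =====

-- B never splits the page into a list of lines: it scans the raw string newline by newline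
-- (find("\n") on the unconsumed rest) and splices the injection text in place; same cost, a
-- different data representation (string offsets instead of a line list).

-- ===== PORT A =====
def inject_question_figure (page_text : String) (question_prefix : String) (image_link : String) (ocr_text : String) : String :=
  let lines := (PySem.Str.split? page_text "\n").getD []
  let res := lines.foldl (fun (st : List String × Bool) line =>
    let out := st.1 ++ [line]
    if !st.2 && PySem.Str.startswith (PySem.Str.strip line) question_prefix then
      let out := out ++ [image_link]
      let out := if PySem.Str.strip ocr_text ≠ "" then
          out ++ ["OCR:", "> " ++ PySem.Str.join "\n> " (PySem.Str.splitlines ocr_text)]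
        else out
      (out, true)
    else (out, st.2)) ([], false)
  PySem.Str.join "\n" res.1

-- ===== PORT B =====
-- Source B's while-loop: head = consumed prefix, rest = unconsumed suffix; one step per newline.
def pvScan (qp inj orig : List Char) (head rest : List Char) : List Char :=
  let nl := PySem.Chars.find rest ['\n']
  let line := if nl = -1 then rest else PySem.List.slice rest none (some nl)
  if PySem.Chars.startswith (PySem.Chars.strip line) qp then
    head ++ line ++ inj ++ (if nl = -1 then [] else PySem.List.slice rest (some nl) none)
  else if h : nl = -1 then orig
  else
    pvScan qp inj orig (head ++ PySem.List.slice rest none (some (nl + 1)))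
      (PySem.List.slice rest (some (nl + 1)) none)
termination_by rest.length
decreasing_by
  have h0 : 0 ≤ PySem.Chars.find rest ['\n'] := by
    have := PySem.Chars.neg_one_le_find rest ['\n']; omega
  have hpre := (PySem.Chars.find_spec h0).1
  have hlt : (PySem.Chars.find rest ['\n']).toNat < rest.length := by
    rcases hpre with ⟨t, ht⟩
    have : (List.drop (PySem.Chars.find rest ['\n']).toNat rest).length ≠ 0 := by
      rw [← ht]; simp
    simp at this
    omega
  rw [PySem.List.slice_from rest (by omega)]
  simp
  omega

def inject_question_figure_alt (page_text : String) (question_prefix : String) (image_link : String) (ocr_text : String) : String :=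
  let inj := '\n' :: image_link.toList ++
    (if PySem.Chars.strip ocr_text.toList ≠ [] then
        "\nOCR:\n> ".toList ++
          PySem.Chars.join "\n> ".toList (PySem.Chars.splitlines ocr_text.toList)
      else [])
  String.ofList (pvScan question_prefix.toList inj page_text.toList [] page_text.toList)

-- ===== PRECONDITION & SPEC =====
def Spec_inject_question_figure (page_text : String) (question_prefix : String) (image_link : String) (ocr_text : String) (out : String) : Prop := out = inject_question_figure_alt page_text question_prefix image_link ocr_text
instance (page_text : String) (question_prefix : String) (image_link : String) (ocr_text : String) (out : String) : Decidable (Spec_inject_question_figure page_text question_prefix image_link ocr_text out) := by unfold Spec_inject_question_figure; infer_instance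

-- ===== CLAIM (what is proved, stated in full; the proofs are below) =====
def Claim_equal_inject_question_figure : Prop := ∀ (page_text : String) (question_prefix : String) (image_link : String) (ocr_text : String), Dom_inject_question_figure page_text question_prefix image_link ocr_text → Spec_inject_question_figure page_text question_prefix image_link ocr_text (inject_question_figure page_text question_prefix image_link ocr_text)

-- ===== LEMMAS AND PROOFS =====

-- A's loop abstracted: predicate p, injection block inj.
def pvStep {α : Type} (p : α → Bool) (inj : List α) (st : List α × Bool) (a : α) : List α × Bool :=
  let out := st.1 ++ [a]
  if !st.2 && p a then (out ++ inj, true) else (out, st.2)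

theorem pvFold_true {α : Type} (p : α → Bool) (inj : List α) :
    ∀ (ls acc : List α), ls.foldl (pvStep p inj) (acc, true) = (acc ++ ls, true) := by
  intro ls
  induction ls with
  | nil => simp
  | cons a ls ih =>
    intro acc
    simp [List.foldl_cons, pvStep, ih]

theorem pvFold_false {α : Type} (p : α → Bool) (inj : List α) :
    ∀ (ls acc : List α), ls.foldl (pvStep p inj) (acc, false) =
      (match ls.findIdx? p with
       | none => (acc ++ ls, false)
       | some i => (acc ++ ls.take (i+1) ++ inj ++ ls.drop (i+1), true)) := by
  intro ls
  induction ls with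
  | nil => simp
  | cons a ls ih =>
    intro acc
    by_cases h : p a = true
    · simp [List.foldl_cons, pvStep, h, pvFold_true, List.findIdx?_cons]
    · have h' : p a = false := by simpa using h
      simp [List.foldl_cons, pvStep, h', ih, List.findIdx?_cons]
      cases hf : ls.findIdx? p with
      | none => simp
      | some i => simp

-- simple structural description of s.split("\n")
def pvSp : List Char → List (List Char)
  | [] => [[]]
  | c :: rest =>
    if c = '\n' then [] :: pvSp rest
    else match pvSp rest with
      | r :: rs => (c :: r) :: rs
      | [] => [[c]]

theorem pvSp_ne_nil (l : List Char) : pvSp l ≠ [] := by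
  cases l with
  | nil => simp [pvSp]
  | cons c rest =>
    simp only [pvSp]
    split
    · simp
    · cases h : pvSp rest <;> simp

theorem pvGo_eq : ∀ (fuel : Nat) (l cur : List Char) (acc : List (List Char)),
    l.length < fuel →
    PySem.Chars.splitOn.go ['\n'] fuel l cur acc =
      acc.reverse ++ (match pvSp l with
        | r :: rs => (cur.reverse ++ r) :: rs
        | [] => []) := by
  intro fuel
  induction fuel with
  | zero => intro l cur acc h; omega
  | succ f ih =>
    intro l cur acc h
    cases l with
    | nil => simp [PySem.Chars.splitOn.go, pvSp]
    | cons c rest =>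
      rw [PySem.Chars.splitOn.go]
      by_cases hc : c = '\n'
      · subst hc
        simp only [List.isPrefixOf, List.length_cons] at *
        rw [if_pos (by decide)]
        rw [ih _ _ _ (by simpa using Nat.lt_of_succ_lt_succ h)]
        simp [pvSp]
        cases hsp : pvSp rest with
        | nil => exact absurd hsp (pvSp_ne_nil rest)
        | cons r rs => simp
      · rw [if_neg (by simp [List.isPrefixOf]; intro hcc; exact hc (by simpa using hcc.symm))]
        rw [ih _ _ _ (by simp at h ⊢; omega)]
        simp [pvSp, hc]
        cases hsp : pvSp rest with
        | nil => exact absurd hsp (pvSp_ne_nil rest)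
        | cons r rs => simp

theorem pvSplitOn_eq (l : List Char) : PySem.Chars.splitOn l ['\n'] = pvSp l := by
  rw [PySem.Chars.splitOn, pvGo_eq (l.length + 1) l [] [] (by omega)]
  cases hsp : pvSp l with
  | nil => exact absurd hsp (pvSp_ne_nil l)
  | cons r rs => simp

theorem pvJoin_pvSp (l : List Char) : PySem.Chars.join ['\n'] (pvSp l) = l := by
  induction l with
  | nil => simp [pvSp, PySem.Chars.join_singleton]
  | cons c rest ih =>
    simp only [pvSp]
    by_cases hc : c = '\n'
    · subst hc
      rw [if_pos rfl]
      cases hsp : pvSp rest with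
      | nil => exact absurd hsp (pvSp_ne_nil rest)
      | cons r rs =>
        rw [PySem.Chars.join_cons_cons]
        rw [hsp] at ih
        simp [ih]
    · rw [if_neg hc]
      cases hsp : pvSp rest with
      | nil => exact absurd hsp (pvSp_ne_nil rest)
      | cons r rs =>
        rw [hsp] at ih
        cases rs with
        | nil => simp_all [PySem.Chars.join_singleton]
        | cons q qs =>
          rw [PySem.Chars.join_cons_cons] at ih ⊢
          simp [← ih]

theorem pvSp_no_nl (l : List Char) (h : '\n' ∉ l) : pvSp l = [l] := by
  induction l with
  | nil => simp [pvSp]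
  | cons c rest ih =>
    simp at h
    have hc : ¬ c = '\n' := fun e => h.1 e.symm
    simp [pvSp, hc, ih h.2]

theorem pvSp_append (a b : List Char) (h : '\n' ∉ a) : pvSp (a ++ '\n' :: b) = a :: pvSp b := by
  induction a with
  | nil => simp [pvSp]
  | cons c rest ih =>
    simp at h
    have hc : ¬ c = '\n' := fun e => h.1 e.symm
    simp [pvSp, hc, ih h.2]

-- join over an append with nonempty left part
theorem pvJoin_append (sep : List Char) (xs ys : List (List Char)) (hx : xs ≠ []) :
    PySem.Chars.join sep (xs ++ ys) =
      PySem.Chars.join sep xs ++ (if ys = [] then [] else sep ++ PySem.Chars.join sep ys) := by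
  induction xs with
  | nil => simp at hx
  | cons a xs ih =>
    cases xs with
    | nil =>
      cases ys with
      | nil => simp [PySem.Chars.join_singleton]
      | cons b ys => simp [PySem.Chars.join_cons_cons, PySem.Chars.join_singleton]
    | cons a' xs' =>
      have hih := ih (by simp)
      simp only [List.cons_append] at hih ⊢
      rw [PySem.Chars.join_cons_cons, PySem.Chars.join_cons_cons, hih]
      simp

-- where Python's rest.find("\n") points: rest = a ++ '\n' :: b, no '\n' in a
theorem pvFind_decomp (rest : List Char) (h : PySem.Chars.find rest ['\n'] ≠ -1) :
    ∃ a b : List Char, rest = a ++ '\n' :: b ∧ '\n' ∉ a ∧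
      PySem.Chars.find rest ['\n'] = (a.length : Int) := by
  have h0 : 0 ≤ PySem.Chars.find rest ['\n'] := by
    have := PySem.Chars.neg_one_le_find rest ['\n']; omega
  obtain ⟨hpre, hmin⟩ := PySem.Chars.find_spec h0
  set n := (PySem.Chars.find rest ['\n']).toNat with hn
  refine ⟨rest.take n, rest.drop (n + 1), ?_, ?_, ?_⟩
  · rcases hpre with ⟨t, ht⟩
    have hd : rest.drop n = '\n' :: rest.drop (n + 1) := by
      rw [← List.tail_drop, ← ht]; simp
    rw [← hd]
    exact (List.take_append_drop n rest).symm
  · intro hmem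
    obtain ⟨i, hi, hgi⟩ := List.getElem_of_mem hmem
    have hilen : i < rest.length := by
      have := List.length_take_le n rest
      have : i < n := by
        have := hi; simp [List.length_take] at this; omega
      have hnr : n < rest.length := by
        rcases hpre with ⟨t, ht⟩
        have : (List.drop n rest).length ≠ 0 := by rw [← ht]; simp
        simp at this; omega
      omega
    have hi' : i < n := by simp [List.length_take] at hi; omega
    apply hmin i hi'
    have : rest.drop i = rest[i] :: rest.drop (i + 1) := by
      exact List.drop_eq_getElem_cons hilen
    rw [this]
    have : rest[i] = '\n' := by
      rw [← hgi]; simp [List.getElem_take]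
    rw [this]
    exact ⟨rest.drop (i + 1), rfl⟩
  · simp [List.length_take]
    rcases hpre with ⟨t, ht⟩
    have : (List.drop n rest).length ≠ 0 := by rw [← ht]; simp
    simp at this
    omega

theorem pvScan_eq (qp inj orig : List Char) :
    ∀ (n : Nat) (rest head : List Char), rest.length ≤ n →
    pvScan qp inj orig head rest =
      match (pvSp rest).findIdx? (fun l => PySem.Chars.startswith (PySem.Chars.strip l) qp) with
      | none => orig
      | some i =>
        head ++ PySem.Chars.join ['\n'] ((pvSp rest).take (i+1)) ++ inj ++
          (if (pvSp rest).drop (i+1) = [] then []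
           else '\n' :: PySem.Chars.join ['\n'] ((pvSp rest).drop (i+1))) := by
  intro n
  induction n with
  | zero =>
    intro rest head hle
    have : rest = [] := by simpa using List.length_eq_zero_iff.mp (by omega)
    subst this
    rw [pvScan]
    simp only [pvSp]
    have hfn : PySem.Chars.find [] ['\n'] = -1 := rfl
    by_cases hp : PySem.Chars.startswith (PySem.Chars.strip []) qp = true
    · simp [hp, hfn, List.findIdx?_cons, PySem.Chars.join_singleton]
    · simp [hp, hfn, List.findIdx?_cons]
  | succ n ih =>
    intro rest head hle
    rw [pvScan]
    by_cases hnl : PySem.Chars.find rest ['\n'] = -1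
    · -- no newline in rest: single line
      have hmem : '\n' ∉ rest := by
        have := (PySem.Chars.find_eq_neg_one_iff rest ['\n']).mp hnl
        exact fun hm => this ((List.singleton_infix_iff '\n' rest).mpr hm)
      have hsp : pvSp rest = [rest] := pvSp_no_nl rest hmem
      simp only [hnl, hsp, List.findIdx?_cons]
      by_cases hp : PySem.Chars.startswith (PySem.Chars.strip rest) qp = true
      · simp [hp, PySem.Chars.join_singleton]
      · simp [hp]
    · obtain ⟨a, b, hrest, hna, hlen⟩ := pvFind_decomp rest hnl
      have h0 : (0:Int) ≤ PySem.Chars.find rest ['\n'] := by rw [hlen]; positivity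
      have htoNat : (PySem.Chars.find rest ['\n']).toNat = a.length := by rw [hlen]; simp
      have hline : PySem.List.slice rest none (some (PySem.Chars.find rest ['\n'])) = a := by
        rw [PySem.List.slice_to rest h0, htoNat, hrest, List.take_left]
      have hsp : pvSp rest = a :: pvSp b := by rw [hrest]; exact pvSp_append a b hna
      simp only [hnl, hline, hsp, List.findIdx?_cons, ite_false, dite_false]
      by_cases hp : PySem.Chars.startswith (PySem.Chars.strip a) qp = true
      · -- first line matches
        have hdrop : PySem.List.slice rest (some (PySem.Chars.find rest ['\n'])) none = '\n' :: b := by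
          rw [PySem.List.slice_from rest h0, htoNat, hrest, List.drop_left]
        simp [hp, hdrop, PySem.Chars.join_singleton, pvSp_ne_nil, pvJoin_pvSp]
      · -- first line does not match: one step of the while loop
        have htake1 : PySem.List.slice rest none (some (PySem.Chars.find rest ['\n'] + 1)) = a ++ ['\n'] := by
          rw [PySem.List.slice_to rest (by omega), hlen]
          have h1 : ((a.length : Int) + 1).toNat = (a ++ ['\n']).length := by simp
          rw [h1, hrest, show a ++ '\n' :: b = (a ++ ['\n']) ++ b by simp, List.take_left]
        have hdrop1 : PySem.List.slice rest (some (PySem.Chars.find rest ['\n'] + 1)) none = b := by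
          rw [PySem.List.slice_from rest (by omega), hlen]
          have h1 : ((a.length : Int) + 1).toNat = (a ++ ['\n']).length := by simp
          rw [h1, hrest, show a ++ '\n' :: b = (a ++ ['\n']) ++ b by simp, List.drop_left]
        have hblen : b.length ≤ n := by
          have h2 : rest.length = a.length + 1 + b.length := by rw [hrest]; simp; omega
          omega
        rw [if_neg hp, htake1, hdrop1, ih b (head ++ (a ++ ['\n'])) hblen]
        rw [if_neg hp]
        cases hf : (pvSp b).findIdx? (fun l => PySem.Chars.startswith (PySem.Chars.strip l) qp) with
        | none => simp
        | some j =>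
          simp only [Option.map_some]
          have hne : (pvSp b).take (j+1) ≠ [] := by
            intro hEq
            have hnn := pvSp_ne_nil b
            rcases List.take_eq_nil_iff.mp hEq with h | h
            all_goals first | omega | exact hnn h
          cases hm : (pvSp b).take (j+1) with
          | nil => exact absurd hm hne
          | cons q qs =>
            rw [show j + 1 + 1 = (j+1) + 1 from rfl]
            simp only [List.take_succ_cons, List.drop_succ_cons, hm,
              PySem.Chars.join_cons_cons]
            simp

theorem pvPortsAgree : ∀ (page_text question_prefix image_link ocr_text : String),
    inject_question_figure page_text question_prefix image_link ocr_text =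
      inject_question_figure_alt page_text question_prefix image_link ocr_text := by
  intro page qp il ocr
  unfold inject_question_figure inject_question_figure_alt
  dsimp only
  -- A's line list is pvSp of the character list
  have hlines : (PySem.Str.split? page "\n").getD [] = (pvSp page.toList).map String.ofList := by
    rw [PySem.Str.split?]
    simp [PySem.Chars.split?, show ("\n".toList : List Char) = ['\n'] from rfl,
      pvSplitOn_eq, List.isEmpty]
  -- A's loop body is pvStep
  have hstep : (fun (st : List String × Bool) line =>
      let out := st.1 ++ [line]
      if !st.2 && PySem.Str.startswith (PySem.Str.strip line) qp then
        let out := out ++ [il]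
        let out := if PySem.Str.strip ocr ≠ "" then
            out ++ ["OCR:", "> " ++ PySem.Str.join "\n> " (PySem.Str.splitlines ocr)]
          else out
        (out, true)
      else (out, st.2)) =
      pvStep (fun s => PySem.Str.startswith (PySem.Str.strip s) qp)
        ([il] ++ (if PySem.Str.strip ocr ≠ "" then
            ["OCR:", "> " ++ PySem.Str.join "\n> " (PySem.Str.splitlines ocr)] else [])) := by
    funext st a
    simp only [pvStep]
    by_cases hocr : PySem.Str.strip ocr ≠ "" <;> simp [hocr, List.append_assoc]
  rw [hlines, hstep, pvFold_false]
  rw [pvScan_eq qp.toList _ page.toList page.toList.length page.toList [] (le_refl _)]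
  rw [List.findIdx?_map]
  have hpred : ((fun s => PySem.Str.startswith (PySem.Str.strip s) qp) ∘ String.ofList) =
      (fun l => PySem.Chars.startswith (PySem.Chars.strip l) qp.toList) := by
    funext cs
    simp [Function.comp, PySem.Str.startswith_eq, PySem.Str.toList_strip]
  rw [hpred]
  have hocrEq : (PySem.Str.strip ocr ≠ "") ↔ (PySem.Chars.strip ocr.toList ≠ []) := by
    simp only [ne_eq, ← String.toList_inj, PySem.Str.toList_strip,
      show ("".toList : List Char) = [] from rfl]
  cases hf : (pvSp page.toList).findIdx?
      (fun l => PySem.Chars.startswith (PySem.Chars.strip l) qp.toList) with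
  | none =>
    rw [← String.toList_inj, PySem.Str.toList_join]
    have hid : (pvSp page.toList).map (String.toList ∘ String.ofList) = pvSp page.toList := by
      simp [Function.comp_def]
    simp only [String.toList_ofList, List.nil_append, List.map_map]
    rw [show ("\n".toList : List Char) = ['\n'] from rfl, hid, pvJoin_pvSp]
  | some i =>
    rw [← String.toList_inj, PySem.Str.toList_join, String.toList_ofList]
    have hilen : i < (pvSp page.toList).length := by
      exact (List.findIdx?_eq_some_iff_getElem.mp hf).1
    have htk : (pvSp page.toList).take (i+1) ≠ [] := by
      intro hEq
      have hnn := pvSp_ne_nil page.toList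
      rcases List.take_eq_nil_iff.mp hEq with h | h
      all_goals first | omega | exact hnn h
    set L := pvSp page.toList with hL
    -- push map toList through
    have hmap : List.map String.toList
        ((L.map String.ofList).take (i+1) ++
          ([il] ++ (if PySem.Str.strip ocr ≠ "" then
            ["OCR:", "> " ++ PySem.Str.join "\n> " (PySem.Str.splitlines ocr)] else [])) ++
          (L.map String.ofList).drop (i+1)) =
        L.take (i+1) ++
          ([il.toList] ++ (if PySem.Str.strip ocr ≠ "" then
            ["OCR:".toList, ("> " ++ PySem.Str.join "\n> " (PySem.Str.splitlines ocr)).toList] else [])) ++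
          L.drop (i+1) := by
      by_cases hocr : PySem.Str.strip ocr ≠ "" <;>
        simp [hocr, ← List.map_take, ← List.map_drop, Function.comp_def]
    simp only [List.nil_append]
    rw [hmap]
    rw [List.append_assoc, pvJoin_append _ _ _ htk, pvJoin_append _ _ _ (by by_cases hocr : PySem.Str.strip ocr ≠ "" <;> simp [hocr])]
    by_cases hocr : PySem.Chars.strip ocr.toList = []
    · have hocr' : ¬ (PySem.Str.strip ocr ≠ "") := by rw [hocrEq]; simpa using hocr
      simp only [hocr', ite_false]
      simp only [hocr, ne_eq, not_true_eq_false, ite_false]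
      simp [PySem.Chars.join_singleton]
    · have hocr' : PySem.Str.strip ocr ≠ "" := hocrEq.mpr hocr
      simp only [hocr, hocr', ne_eq, not_false_eq_true, ite_true]
      rw [if_neg (by simp)]
      simp only [List.cons_append, List.nil_append]
      rw [PySem.Chars.join_cons_cons, PySem.Chars.join_cons_cons, PySem.Chars.join_singleton]
      simp only [String.toList_ofList, String.toList_append, PySem.Str.toList_join,
        PySem.Str.splitlines_map_toList]
      by_cases hd : L.drop (i+1) = [] <;>
        simp [hd, List.append_assoc,
          show ("\nOCR:\n> ".toList : List Char) = '\n' :: "OCR:".toList ++ '\n' :: "> ".toList from rfl]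

-- ===== VERDICT (by name: the statement is the Claim_ definition above) =====
theorem inject_question_figure_spec : Claim_equal_inject_question_figure := by
  intro page_text question_prefix image_link ocr_text _
  unfold Spec_inject_question_figure
  exact pvPortsAgree page_text question_prefix image_link ocr_text
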